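-- pv_equiv track=rewrite | github.com/TurtleSmoke/Advent-of-Code | 2023/day_21/main.py | walking
-- ===== SOURCE A (Python) =====
-- def walking(sparse, size, remainder):
--     modp = lambda x: (x[0] % size, x[1] % size)
--     addp = lambda x, y: ((x[0] + y[0]), (x[1] + y[1]))
--
--     visited = {next(k for k, v in sparse.items() if v == "S")}
--     new = visited.copy()
--     cache = {-1: 0, 0: 1}
--
--     new_dirs = [(1, 0), (-1, 0), (0, 1), (0, -1)]
--     for i in range(1, 2 * size + remainder + 1):
--         visited, new = new, {
--             new_pos
--             for pos in new
--             for direction in new_dirs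
--             for new_pos in [addp(pos, direction)]
--             if new_pos not in visited and modp(new_pos) in sparse
--         }
--         cache[i] = len(new) + cache[i - 2]
--
--     return cache
-- ===== SOURCE B (Python) =====
-- def walking(sparse, size, remainder):
--     steps = 2 * size + remainder
--     start = next(k for k, v in sparse.items() if v == "S")
--     # One ordinary FIFO BFS: iterate over the growing queue itself, recording
--     # each cell's shortest distance once; no level frontiers are kept.
--     dist = {start: 0}
--     queue = [start]
--     for x, y in queue:  # appends below extend this iteration
--         d = dist[(x, y)]
--         if d >= steps:
--             continue
--         for np in ((x + 1, y), (x - 1, y), (x, y + 1), (x, y - 1)):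
--             if np not in dist and (np[0] % size, np[1] % size) in sparse:
--                 dist[np] = d + 1
--                 queue.append(np)
--     # Tally how many cells sit at each distance.
--     counts = {}
--     for v in dist.values():
--         counts[v] = counts.get(v, 0) + 1
--     # Running totals per parity give the reachable-cell counts directly.
--     totals = {0: 1, 1: 0}
--     cache = {-1: 0, 0: 1}
--     for i in range(1, steps + 1):
--         par = i % 2
--         totals[par] = totals[par] + counts.get(i, 0)
--         cache[i] = totals[par]
--     return cache
-- ===== Notes on version B (the rewrite author's own statement) =====
-- stated objective: alternative
-- what changed: B replaces A's level-synchronous frontier expansion (two swapped frontier sets, visited kept as the frontier from two steps back, cache accumulated inline via cache[i-2]) by a single per-node FIFO BFS over one growing queue that records every cell's shortest distance in a dist dict, followed by a separate counting pass: a tally of distances and running per-parity totals produce each cache entry, with no frontier sets and no cache[i-2] recurrence.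
-- outside the precondition, e.g. on walking({}, 1, 3): A raises StopIteration, B raises StopIteration; on walking({(0, 0): 'S'}, 0, 2): A raises ZeroDivisionError, B raises ZeroDivisionError
import Mathlib
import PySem

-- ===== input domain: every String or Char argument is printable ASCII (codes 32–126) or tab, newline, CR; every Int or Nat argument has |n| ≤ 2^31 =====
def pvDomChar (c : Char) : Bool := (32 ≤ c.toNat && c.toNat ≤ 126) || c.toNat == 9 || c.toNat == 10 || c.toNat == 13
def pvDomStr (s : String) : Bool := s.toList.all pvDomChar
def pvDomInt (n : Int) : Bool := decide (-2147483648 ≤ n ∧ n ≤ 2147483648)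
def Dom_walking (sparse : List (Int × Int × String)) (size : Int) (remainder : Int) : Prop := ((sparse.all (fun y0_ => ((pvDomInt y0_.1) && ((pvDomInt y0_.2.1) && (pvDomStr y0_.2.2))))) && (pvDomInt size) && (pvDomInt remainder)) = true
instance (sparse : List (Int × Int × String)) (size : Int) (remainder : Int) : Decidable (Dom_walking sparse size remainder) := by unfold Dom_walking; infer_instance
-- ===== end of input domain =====

-- B replaces A's level-synchronous two-frontier loop by one per-node FIFO BFS recording
-- shortest distances, then rebuilds the cache from a distance tally with per-parity
-- running totals (objective: alternative; same measured speed).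

-- ===== PORT A =====
def pvDirsA : List (Int × Int) := [(1, 0), (-1, 0), (0, 1), (0, -1)]

def walking (sparse : List (Int × Int × String)) (size : Int) (remainder : Int) : List (Int × Int) :=
  let sd : PySem.Dict (Int × Int) String :=
    PySem.Dict.ofList (sparse.map (fun t => ((t.1, t.2.1), t.2.2)))
  match (sd.items.filter (fun kv => kv.2 == "S")).head? with
  | none => []  -- Python raises StopIteration here; excluded by Pre_walking
  | some kv =>
    let start := kv.1
    let st0 : PySem.Set (Int × Int) × PySem.Set (Int × Int) × PySem.Dict Int Int :=
      (PySem.Set.ofList [start], PySem.Set.ofList [start],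
        ((PySem.Dict.empty : PySem.Dict Int Int).insert (-1) 0).insert 0 1)
    let fin := (PySem.List.pyRange 1 (2 * size + remainder + 1) 1).foldl (fun st i =>
      let visited := st.1
      let new := st.2.1
      let cache := st.2.2
      let new' : PySem.Set (Int × Int) := PySem.Set.ofList
        (new.flatMap (fun pos =>
          pvDirsA.filterMap (fun dir =>
            let np : Int × Int := (pos.1 + dir.1, pos.2 + dir.2)
            if ¬ np ∈ visited ∧ sd.contains (PySem.Int.mod np.1 size, PySem.Int.mod np.2 size) = true
            then some np else none)))
      (new, new', cache.insert i (PySem.Set.len new' + cache.getD (i - 2) 0))) st0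
    fin.2.2.items

-- ===== PORT B =====
def pvNbrsB (p : Int × Int) : List (Int × Int) :=
  [(p.1 + 1, p.2), (p.1 - 1, p.2), (p.1, p.2 + 1), (p.1, p.2 - 1)]

-- the single growing FIFO queue, iterated from the front (fuel makes the while-loop total)
def pvBfsB (sd : PySem.Dict (Int × Int) String) (size steps : Int) :
    Nat → PySem.Dict (Int × Int) Int → List (Int × Int) → PySem.Dict (Int × Int) Int
  | _, dist, [] => dist
  | 0, dist, _ :: _ => dist
  | fuel + 1, dist, p :: pending =>
    let d := dist.getD p 0
    if steps ≤ d then pvBfsB sd size steps fuel dist pending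
    else
      let res := (pvNbrsB p).foldl (fun acc np =>
        if ¬ acc.1.contains np = true ∧ sd.contains (PySem.Int.mod np.1 size, PySem.Int.mod np.2 size) = true
        then (acc.1.insert np (d + 1), acc.2 ++ [np]) else acc) (dist, pending)
      pvBfsB sd size steps fuel res.1 res.2

def walking_alt (sparse : List (Int × Int × String)) (size : Int) (remainder : Int) : List (Int × Int) :=
  let sd : PySem.Dict (Int × Int) String :=
    PySem.Dict.ofList (sparse.map (fun t => ((t.1, t.2.1), t.2.2)))
  match (sd.items.filter (fun kv => kv.2 == "S")).head? with
  | none => []  -- Python raises StopIteration here; excluded by Pre_walking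
  | some kv =>
    let start := kv.1
    let steps := 2 * size + remainder
    let dist := pvBfsB sd size steps (4 ^ (steps.toNat + 1) + 1)
      ((PySem.Dict.empty : PySem.Dict (Int × Int) Int).insert start 0) [start]
    let counts := dist.values.foldl (fun c v => c.insert v (c.getD v 0 + 1))
      (PySem.Dict.empty : PySem.Dict Int Int)
    let fin := (PySem.List.pyRange 1 (steps + 1) 1).foldl (fun tc i =>
        let par := PySem.Int.mod i 2
        let t := tc.1.insert par (tc.1.getD par 0 + counts.getD i 0)
        (t, tc.2.insert i (t.getD par 0)))
      (((PySem.Dict.empty : PySem.Dict Int Int).insert 0 1).insert 1 0,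
       ((PySem.Dict.empty : PySem.Dict Int Int).insert (-1) 0).insert 0 1)
    fin.2.items

-- ===== PRECONDITION & SPEC =====
-- Pre_ excludes exactly the inputs where the Python A raises: no cell with value "S" in the
-- (duplicate-collapsed) dict (StopIteration), or size = 0 with a positive step count (ZeroDivisionError).
def Pre_walking (sparse : List (Int × Int × String)) (size : Int) (remainder : Int) : Prop :=
  "S" ∈ (PySem.Dict.ofList (sparse.map (fun t => ((t.1, t.2.1), t.2.2)))).values
    ∧ (size ≠ 0 ∨ 2 * size + remainder ≤ 0)
instance (sparse : List (Int × Int × String)) (size : Int) (remainder : Int) : Decidable (Pre_walking sparse size remainder) := by unfold Pre_walking; infer_instance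

def pvWitness_walking : (List (Int × Int × String)) × Int × Int := ([(0, 0, "S")], 1, 0)

def Spec_walking (sparse : List (Int × Int × String)) (size : Int) (remainder : Int) (out : List (Int × Int)) : Prop := out = walking_alt sparse size remainder
instance (sparse : List (Int × Int × String)) (size : Int) (remainder : Int) (out : List (Int × Int)) : Decidable (Spec_walking sparse size remainder out) := by unfold Spec_walking; infer_instance

-- ===== CLAIM (what is proved, stated in full; the proofs are below) =====
def Claim_equal_walking : Prop := ∀ (sparse : List (Int × Int × String)) (size : Int) (remainder : Int), Dom_walking sparse size remainder → Pre_walking sparse size remainder → Spec_walking sparse size remainder (walking sparse size remainder)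

-- ===== LEMMAS AND PROOFS =====

-- Abstract model: pvF n = set of cells first reached at step n, pvSeen n = all cells within n steps.

def pvLevel (ok : Int × Int → Bool) (seen cur : List (Int × Int)) : List (Int × Int) :=
  PySem.List.dedup ((cur.flatMap pvNbrsB).filter (fun q => !(seen.contains q) && ok q))

def pvFS (ok : Int × Int → Bool) (start : Int × Int) : Nat → List (Int × Int) × List (Int × Int)
  | 0 => ([start], [start])
  | n + 1 =>
    let sf := pvFS ok start n
    let f' := pvLevel ok sf.1 sf.2
    (sf.1 ++ f', f')

def pvSeen (ok : Int × Int → Bool) (start : Int × Int) (n : Nat) : List (Int × Int) :=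
  (pvFS ok start n).1

def pvF (ok : Int × Int → Bool) (start : Int × Int) (n : Nat) : List (Int × Int) :=
  (pvFS ok start n).2

def pvPrev (ok : Int × Int → Bool) (start : Int × Int) : Nat → List (Int × Int)
  | 0 => [start]
  | m + 1 => pvF ok start m

def pvCache0 : PySem.Dict Int Int :=
  ((PySem.Dict.empty : PySem.Dict Int Int).insert (-1) 0).insert 0 1

def pvCache (ok : Int × Int → Bool) (start : Int × Int) (steps : Int) : PySem.Dict Int Int :=
  (PySem.List.pyRange 1 (steps + 1) 1).foldl
    (fun c i => c.insert i ((((pvF ok start i.toNat).length : Int)) + c.getD (i - 2) 0)) pvCache0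

def pvItems (ok : Int × Int → Bool) (start : Int × Int) (n : Nat) : List ((Int × Int) × Int) :=
  (List.range (n + 1)).flatMap (fun j => (pvF ok start j).map (fun p => (p, (j : Int))))

-- ---------- basic structural lemmas ----------

theorem pvF_zero (ok : Int × Int → Bool) (start : Int × Int) : pvF ok start 0 = [start] := rfl

theorem pvF_succ (ok : Int × Int → Bool) (start : Int × Int) (n : Nat) :
    pvF ok start (n + 1) = pvLevel ok (pvSeen ok start n) (pvF ok start n) := rfl

theorem pvSeen_succ (ok : Int × Int → Bool) (start : Int × Int) (n : Nat) :
    pvSeen ok start (n + 1) = pvSeen ok start n ++ pvF ok start (n + 1) := rfl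

theorem pvMem_seen (ok : Int × Int → Bool) (start : Int × Int) (n : Nat) (q : Int × Int) :
    q ∈ pvSeen ok start n ↔ ∃ j, j ≤ n ∧ q ∈ pvF ok start j := by
  induction n with
  | zero =>
    constructor
    · intro h; exact ⟨0, le_refl 0, h⟩
    · rintro ⟨j, hj, hq⟩; interval_cases j; exact hq
  | succ n ih =>
    rw [pvSeen_succ, List.mem_append, ih]
    constructor
    · rintro (⟨j, hj, hq⟩ | hq)
      · exact ⟨j, Nat.le_succ_of_le hj, hq⟩
      · exact ⟨n + 1, le_refl _, hq⟩
    · rintro ⟨j, hj, hq⟩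
      rcases Nat.lt_or_ge j (n + 1) with h | h
      · exact Or.inl ⟨j, Nat.lt_succ_iff.mp h, hq⟩
      · have : j = n + 1 := le_antisymm hj h
        subst this; exact Or.inr hq

theorem pvSeen_mono (ok : Int × Int → Bool) (start : Int × Int) {j n : Nat} (h : j ≤ n)
    {q : Int × Int} (hq : q ∈ pvSeen ok start j) : q ∈ pvSeen ok start n := by
  induction n with
  | zero => have : j = 0 := Nat.le_zero.mp h; subst this; exact hq
  | succ n ih =>
    rcases Nat.lt_or_ge j (n + 1) with h' | h'
    · rw [pvSeen_succ, List.mem_append]; exact Or.inl (ih (Nat.lt_succ_iff.mp h'))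
    · have : j = n + 1 := le_antisymm h h'
      subst this; exact hq

theorem pvF_sub_seen (ok : Int × Int → Bool) (start : Int × Int) (n : Nat)
    {q : Int × Int} (hq : q ∈ pvF ok start n) : q ∈ pvSeen ok start n := by
  cases n with
  | zero => exact hq
  | succ n => rw [pvSeen_succ, List.mem_append]; exact Or.inr hq

theorem pvF_not_seen (ok : Int × Int → Bool) (start : Int × Int) (n : Nat)
    {q : Int × Int} (hq : q ∈ pvF ok start (n + 1)) : ¬ q ∈ pvSeen ok start n := by
  rw [pvF_succ, pvLevel] at hq
  simp only [PySem.List.dedup_eq_ofList, PySem.Set.mem_ofList, List.mem_filter,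
    Bool.and_eq_true, Bool.not_eq_true'] at hq
  intro hmem
  have := hq.2.1
  rw [List.contains_eq_mem, decide_eq_false_iff_not] at this
  exact this hmem

theorem pvF_ok (ok : Int × Int → Bool) (start : Int × Int) (n : Nat)
    {q : Int × Int} (hq : q ∈ pvF ok start (n + 1)) : ok q = true := by
  rw [pvF_succ, pvLevel] at hq
  simp only [PySem.List.dedup_eq_ofList, PySem.Set.mem_ofList, List.mem_filter,
    Bool.and_eq_true] at hq
  exact hq.2.2

theorem pvF_exists_nbr (ok : Int × Int → Bool) (start : Int × Int) (n : Nat)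
    {q : Int × Int} (hq : q ∈ pvF ok start (n + 1)) :
    ∃ p, p ∈ pvF ok start n ∧ q ∈ pvNbrsB p := by
  rw [pvF_succ, pvLevel] at hq
  simp only [PySem.List.dedup_eq_ofList, PySem.Set.mem_ofList, List.mem_filter,
    List.mem_flatMap] at hq
  obtain ⟨⟨p, hp, hn⟩, _⟩ := hq
  exact ⟨p, hp, hn⟩

-- ---------- geometry: symmetry and parity of the 4-neighbourhood ----------

theorem pvNbr_symm {p q : Int × Int} (h : q ∈ pvNbrsB p) : p ∈ pvNbrsB q := by
  simp only [pvNbrsB, List.mem_cons, List.not_mem_nil, or_false] at h ⊢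
  obtain ⟨a, b⟩ := p; obtain ⟨c, d⟩ := q
  simp only [Prod.mk.injEq] at h ⊢
  rcases h with ⟨h1, h2⟩ | ⟨h1, h2⟩ | ⟨h1, h2⟩ | ⟨h1, h2⟩ <;> omega

theorem pvNbr_sum {p q : Int × Int} (h : q ∈ pvNbrsB p) :
    q.1 + q.2 = p.1 + p.2 + 1 ∨ q.1 + q.2 = p.1 + p.2 - 1 := by
  simp only [pvNbrsB, List.mem_cons, List.not_mem_nil, or_false] at h
  obtain ⟨a, b⟩ := p; obtain ⟨c, d⟩ := q
  simp only [Prod.mk.injEq] at h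
  rcases h with ⟨h1, h2⟩ | ⟨h1, h2⟩ | ⟨h1, h2⟩ | ⟨h1, h2⟩ <;> omega

theorem pvParity (ok : Int × Int → Bool) (start : Int × Int) :
    ∀ (n : Nat) {q : Int × Int}, q ∈ pvF ok start n →
      (q.1 + q.2) % 2 = (start.1 + start.2 + n) % 2 := by
  intro n
  induction n with
  | zero =>
    intro q hq
    have : q = start := by simpa [pvF_zero] using hq
    subst this; simp
  | succ n ih =>
    intro q hq
    obtain ⟨p, hp, hn⟩ := pvF_exists_nbr ok start n hq
    have hps := ih hp
    rcases pvNbr_sum hn with h | h <;> push_cast <;> omega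

theorem pvAbsorb (ok : Int × Int → Bool) (start : Int × Int) :
    ∀ (j : Nat) {q p : Int × Int}, q ∈ pvSeen ok start j → p ∈ pvNbrsB q → ok p = true →
      p ∈ pvSeen ok start (j + 1) := by
  intro j q p hq hn hok
  obtain ⟨k, hk, hqk⟩ := (pvMem_seen ok start j q).mp hq
  by_cases hp : p ∈ pvSeen ok start k
  · exact pvSeen_mono ok start (Nat.le_succ_of_le hk) hp
  · have hmem : p ∈ pvF ok start (k + 1) := by
      rw [pvF_succ, pvLevel]
      simp only [PySem.List.dedup_eq_ofList, PySem.Set.mem_ofList, List.mem_filter,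
        List.mem_flatMap, Bool.and_eq_true, Bool.not_eq_true']
      refine ⟨⟨q, hqk, hn⟩, ?_, hok⟩
      rw [List.contains_eq_mem, decide_eq_false_iff_not]
      exact hp
    exact pvSeen_mono ok start (Nat.succ_le_succ hk) (pvF_sub_seen ok start (k + 1) hmem)

-- the crux: a neighbour of a step-(m+1) cell that is already seen is exactly a step-m cell
theorem pvKey (ok : Int × Int → Bool) (start : Int × Int) (m : Nat)
    {p q : Int × Int} (hp : p ∈ pvF ok start (m + 1)) (hq : q ∈ pvNbrsB p) :
    (q ∈ pvSeen ok start (m + 1) ↔ q ∈ pvF ok start m) := by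
  constructor
  · intro hseen
    obtain ⟨j, hj, hqj⟩ := (pvMem_seen ok start (m + 1) q).mp hseen
    have hj_ne : j ≠ m + 1 := by
      intro h
      subst h
      have h1 := pvParity ok start (m + 1) hp
      have h2 := pvParity ok start (m + 1) hqj
      rcases pvNbr_sum hq with h3 | h3 <;> omega
    have hj_le : j ≤ m := by omega
    have hj_eq : j = m := by
      by_contra hne
      have hj_lt : j + 1 ≤ m := by omega
      have hok := pvF_ok ok start m hp
      have habs := pvAbsorb ok start j (pvF_sub_seen ok start j hqj) (pvNbr_symm hq) hok
      have := pvSeen_mono ok start hj_lt habs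
      exact pvF_not_seen ok start m hp this
    subst hj_eq; exact hqj
  · intro hF
    exact pvSeen_mono ok start (Nat.le_succ m) (pvF_sub_seen ok start m hF)

theorem pvLevel_agree (ok : Int × Int → Bool) (start : Int × Int) (n : Nat) :
    pvLevel ok (pvPrev ok start n) (pvF ok start n) = pvF ok start (n + 1) := by
  cases n with
  | zero => rfl
  | succ m =>
    rw [pvF_succ, pvLevel, pvLevel]
    congr 1
    apply List.filter_congr
    intro x hx
    simp only [List.mem_flatMap] at hx
    obtain ⟨p, hp, hn⟩ := hx
    cases hok : ok x
    · simp
    · simp only [Bool.and_true]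
      congr 1
      have hiff := pvKey ok start m hp hn
      show (pvPrev ok start (m + 1)).contains x = (pvSeen ok start (m + 1)).contains x
      simp only [pvPrev, List.contains_eq_mem]
      rw [decide_eq_decide]
      exact hiff.symm

-- ---------- the seen list is the concatenation of the levels ----------

theorem pvSeen_eq_flatten (ok : Int × Int → Bool) (start : Int × Int) (n : Nat) :
    pvSeen ok start n = (List.range (n + 1)).flatMap (fun j => pvF ok start j) := by
  induction n with
  | zero => rfl
  | succ n ih =>
    rw [pvSeen_succ, ih]
    conv_rhs => rw [List.range_succ]
    rw [List.flatMap_append]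
    simp

theorem pvItems_succ (ok : Int × Int → Bool) (start : Int × Int) (n : Nat) :
    pvItems ok start (n + 1)
      = pvItems ok start n ++ (pvF ok start (n + 1)).map (fun p => (p, ((n : Int) + 1))) := by
  rw [pvItems, pvItems, List.range_succ, List.flatMap_append]
  push_cast
  simp [List.flatMap_cons, List.flatMap_nil]

theorem pvKeys_items (ok : Int × Int → Bool) (start : Int × Int) (n : Nat) :
    (pvItems ok start n).map Prod.fst = pvSeen ok start n := by
  rw [pvSeen_eq_flatten, pvItems, List.map_flatMap]
  simp [Function.comp_def]

-- ---------- dedup / filter machinery ----------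

theorem pvDedup_filter_ne {α : Type} [BEq α] [LawfulBEq α] (a : α) (l : List α) :
    PySem.List.dedup (l.filter (fun x => !(x == a))) =
      (PySem.List.dedup l).filter (fun x => !(x == a)) := by
  induction l with
  | nil => rfl
  | cons x xs ih =>
    simp only [PySem.List.dedup_eq_ofList] at ih ⊢
    by_cases hx : x = a
    · subst hx
      rw [List.filter_cons_of_neg (by simp), PySem.Set.ofList_cons, List.filter_cons_of_neg (by simp)]
      rw [ih, PySem.Set.discard, List.filter_filter]
      apply List.filter_congr
      intro y _
      cases h : y == x <;> simp
    · rw [List.filter_cons_of_pos (by simp [hx]), PySem.Set.ofList_cons, PySem.Set.ofList_cons,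
        List.filter_cons_of_pos (by simp [hx]), ih, PySem.Set.discard, PySem.Set.discard,
        List.filter_filter, List.filter_filter]
      congr 1
      apply List.filter_congr
      intro y _
      cases h1 : y == x <;> cases h2 : y == a <;> simp

theorem pvAdd_fold (ok : Int × Int → Bool) (size : Int) (sd : PySem.Dict (Int × Int) String)
    (hok : ∀ q, sd.contains (PySem.Int.mod q.1 size, PySem.Int.mod q.2 size) = ok q)
    (v : Int) :
    ∀ (l : List (Int × Int)) (dist : PySem.Dict (Int × Int) Int) (acc : List (Int × Int)),
    (l.foldl (fun acc np =>
        if ¬ acc.1.contains np = true ∧ sd.contains (PySem.Int.mod np.1 size, PySem.Int.mod np.2 size) = true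
        then (acc.1.insert np v, acc.2 ++ [np]) else acc) (dist, acc))
      = (PySem.Dict.mk (dist.items ++
            (PySem.List.dedup (l.filter (fun q => !(dist.contains q) && ok q))).map (fun p => (p, v))),
         acc ++ PySem.List.dedup (l.filter (fun q => !(dist.contains q) && ok q))) := by
  intro l
  induction l with
  | nil =>
    intro dist acc
    simp
  | cons np ls ih =>
    intro dist acc
    rw [List.foldl_cons]
    by_cases hc : (¬ dist.contains np = true ∧ ok np = true)
    · have hcon : dist.contains np = false := by
        cases h : dist.contains np
        · rfl
        · exact absurd h hc.1
      rw [if_pos (by rw [hok]; exact hc)]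
      rw [ih]
      have hfilter : ls.filter (fun q => !((dist.insert np v).contains q) && ok q)
          = (ls.filter (fun q => !(dist.contains q) && ok q)).filter (fun x => !(x == np)) := by
        rw [List.filter_filter]
        apply List.filter_congr
        intro y _
        rw [PySem.Dict.contains_insert]
        cases h1 : y == np <;> cases h2 : dist.contains y <;> cases h3 : ok y <;> simp [h1, h2, h3]
      have hkeep : (np :: ls).filter (fun q => !(dist.contains q) && ok q)
          = np :: ls.filter (fun q => !(dist.contains q) && ok q) := by
        rw [List.filter_cons_of_pos (by simp [hcon, hc.2])]
      rw [hfilter, hkeep]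
      have hcomm := pvDedup_filter_ne np (ls.filter (fun q => !(dist.contains q) && ok q))
      rw [PySem.List.dedup_eq_ofList, PySem.List.dedup_eq_ofList] at hcomm
      simp only [PySem.List.dedup_eq_ofList, PySem.Set.ofList_cons, PySem.Set.discard, hcomm,
        PySem.Dict.items_insert_of_not_contains dist v hcon, List.map_cons, List.append_assoc,
        List.cons_append, List.nil_append, List.singleton_append]
    · rw [if_neg (by rw [hok]; exact hc)]
      rw [ih]
      have hdrop : (np :: ls).filter (fun q => !(dist.contains q) && ok q)
          = ls.filter (fun q => !(dist.contains q) && ok q) := by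
        apply List.filter_cons_of_neg
        cases h2 : dist.contains np <;> cases h3 : ok np <;> simp [h2, h3] <;> simp [h2, h3] at hc
      rw [hdrop]

-- ---------- assoc-list lookup on Dict.mk ----------

theorem pvGet?_mk_append_left {κ ν : Type} [BEq κ] [LawfulBEq κ] :
    ∀ (l1 l2 : List (κ × ν)) (k : κ), k ∈ l1.map Prod.fst →
      (PySem.Dict.mk (l1 ++ l2)).get? k = (PySem.Dict.mk l1).get? k := by
  intro l1
  induction l1 with
  | nil => intro l2 k h; simp at h
  | cons a l1 ih =>
    intro l2 k h
    rw [List.cons_append, ← Prod.mk.eta (p := a), PySem.Dict.get?_mk_cons, PySem.Dict.get?_mk_cons]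
    cases ha : a.1 == k with
    | true => simp
    | false =>
      simp only [Bool.false_eq_true, if_false]
      apply ih
      simp only [List.map_cons, List.mem_cons] at h
      rcases h with h | h
      · exact absurd (by simp [h]) (by simp [ha] : ¬ (a.1 == k) = true)
      · exact h

theorem pvGet?_mk_append_right {κ ν : Type} [BEq κ] [LawfulBEq κ] :
    ∀ (l1 l2 : List (κ × ν)) (k : κ), k ∉ l1.map Prod.fst →
      (PySem.Dict.mk (l1 ++ l2)).get? k = (PySem.Dict.mk l2).get? k := by
  intro l1
  induction l1 with
  | nil => intro l2 k _; rfl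
  | cons a l1 ih =>
    intro l2 k h
    simp only [List.map_cons, List.mem_cons, not_or] at h
    rw [List.cons_append, ← Prod.mk.eta (p := a), PySem.Dict.get?_mk_cons]
    have : (a.1 == k) = false := by
      simp only [beq_eq_false_iff_ne, ne_eq]
      exact fun hh => h.1 hh.symm
    simp only [this, Bool.false_eq_true, if_false]
    exact ih l2 k h.2

theorem pvGet?_mk_map_const {v : Int} :
    ∀ (l : List (Int × Int)) (p : Int × Int),
      (PySem.Dict.mk (l.map (fun q => (q, v)))).get? p = if p ∈ l then some v else none := by
  intro l
  induction l with
  | nil => intro p; simp; rfl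
  | cons x l ih =>
    intro p
    rw [List.map_cons, PySem.Dict.get?_mk_cons, ih]
    by_cases hx : x = p
    · simp [hx]
    · have : (x == p) = false := by simp [hx]
      simp [this, hx, Ne.symm hx]

theorem pvGet?_items (ok : Int × Int → Bool) (start : Int × Int) :
    ∀ (M j : Nat), j ≤ M → ∀ p, p ∈ pvF ok start j →
      (PySem.Dict.mk (pvItems ok start M)).get? p = some (j : Int) := by
  intro M
  induction M with
  | zero =>
    intro j hj p hp
    interval_cases j
    have hps : p = start := by simpa [pvF_zero] using hp
    rw [hps]
    have h0 : pvItems ok start 0 = [(start, (0 : Int))] := rfl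
    rw [h0, PySem.Dict.get?_mk_cons]
    simp
  | succ M ih =>
    intro j hj p hp
    rw [pvItems_succ]
    rcases Nat.lt_or_ge j (M + 1) with h | h
    · have hj' : j ≤ M := Nat.lt_succ_iff.mp h
      rw [pvGet?_mk_append_left]
      · exact ih j hj' p hp
      · rw [pvKeys_items]
        exact pvSeen_mono ok start hj' (pvF_sub_seen ok start j hp)
    · have : j = M + 1 := le_antisymm hj h
      subst this
      rw [pvGet?_mk_append_right]
      · rw [pvGet?_mk_map_const, if_pos hp]
        push_cast
        ring_nf
      · rw [pvKeys_items]
        exact pvF_not_seen ok start M hp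

theorem pvContains_ext (ok : Int × Int → Bool) (start : Int × Int) (n : Nat) (v : Int)
    (ext : List (Int × Int)) (q : Int × Int) :
    (PySem.Dict.mk (pvItems ok start n ++ ext.map (fun p => (p, v)))).contains q
      = ((pvSeen ok start n).contains q || ext.contains q) := by
  rw [Bool.eq_iff_iff, PySem.Dict.contains_iff_mem_keys]
  have hkeys : (PySem.Dict.mk (pvItems ok start n ++ ext.map (fun p => (p, v)))).keys
      = pvSeen ok start n ++ ext := by
    show (pvItems ok start n ++ ext.map (fun p => (p, v))).map Prod.fst = _
    rw [List.map_append, pvKeys_items, List.map_map]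
    simp [Function.comp_def]
  rw [hkeys]
  simp [List.contains_eq_mem]

-- ---------- dedup of an appended chunk ----------

theorem pvUpdate_append {α : Type} [BEq α] [LawfulBEq α] :
    ∀ (ys : List α) (s : PySem.Set α),
      PySem.Set.update s ys = s ++ PySem.Set.ofList (ys.filter (fun y => !(s.contains y))) := by
  intro ys
  induction ys with
  | nil => intro s; simp [PySem.Set.update_nil, PySem.Set.ofList_nil]
  | cons y ys ih =>
    intro s
    rw [PySem.Set.update_cons, ih]
    by_cases hmem : y ∈ s
    · rw [PySem.Set.add_of_mem hmem]
      have : (y :: ys).filter (fun y => !(s.contains y)) = ys.filter (fun y => !(s.contains y)) := by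
        apply List.filter_cons_of_neg
        simp [List.contains_eq_mem, hmem]
      rw [this]
    · rw [PySem.Set.add_of_not_mem hmem]
      have h1 : (y :: ys).filter (fun y => !(s.contains y))
          = y :: ys.filter (fun y => !(s.contains y)) := by
        apply List.filter_cons_of_pos
        simp [List.contains_eq_mem, hmem]
      rw [h1, PySem.Set.ofList_cons]
      have h2 : ys.filter (fun z => !((s ++ [y]).contains z))
          = (ys.filter (fun z => !(s.contains z))).filter (fun z => !(z == y)) := by
        rw [List.filter_filter]
        apply List.filter_congr
        intro z _
        by_cases hz : z ∈ s <;> by_cases hzy : z = y <;>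
          simp [List.contains_eq_mem, hz, hzy]
      rw [h2]
      have h3 := pvDedup_filter_ne y (ys.filter (fun z => !(s.contains z)))
      rw [PySem.List.dedup_eq_ofList, PySem.List.dedup_eq_ofList] at h3
      rw [h3, PySem.Set.discard]
      simp [List.append_assoc]

-- pvCpart: the partial next level produced after processing `done` cells of level d
def pvCpart (ok : Int × Int → Bool) (start : Int × Int) (d : Nat) (done : List (Int × Int)) :
    List (Int × Int) :=
  pvLevel ok (pvSeen ok start d) done

theorem pvCpart_full (ok : Int × Int → Bool) (start : Int × Int) (d : Nat) :
    pvCpart ok start d (pvF ok start d) = pvF ok start (d + 1) := rfl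

theorem pvCpart_snoc (ok : Int × Int → Bool) (start : Int × Int) (d : Nat)
    (done : List (Int × Int)) (p : Int × Int) :
    pvCpart ok start d (done ++ [p])
      = pvCpart ok start d done
        ++ PySem.List.dedup ((pvNbrsB p).filter
            (fun q => !((pvSeen ok start d).contains q || (pvCpart ok start d done).contains q) && ok q)) := by
  simp only [pvCpart, pvLevel, PySem.List.dedup_eq_ofList, List.flatMap_append,
    List.flatMap_cons, List.flatMap_nil, List.append_nil, List.filter_append]
  rw [PySem.Set.ofList_append, pvUpdate_append]
  congr 1
  congr 1
  rw [List.filter_filter]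
  apply List.filter_congr
  intro q _
  cases hs : (pvSeen ok start d).contains q <;>
    cases hc : (PySem.Set.ofList ((done.flatMap pvNbrsB).filter
        (fun q => !(pvSeen ok start d).contains q && ok q))).contains q <;>
    cases hok : ok q <;>
    simp_all [pvCpart, pvLevel, PySem.List.dedup_eq_ofList]

-- ---------- port B FIFO loop ----------

theorem pvInner (ok : Int × Int → Bool) (size steps : Int) (sd : PySem.Dict (Int × Int) String)
    (hok : ∀ q, sd.contains (PySem.Int.mod q.1 size, PySem.Int.mod q.2 size) = ok q)
    (start : Int × Int) (d : Nat) (hd : (d : Int) < steps) :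
    ∀ (todo done : List (Int × Int)) (fuel : Nat),
      pvF ok start d = done ++ todo → todo.length ≤ fuel →
      pvBfsB sd size steps fuel
        (PySem.Dict.mk (pvItems ok start d
          ++ (pvCpart ok start d done).map (fun q => (q, (d : Int) + 1))))
        (todo ++ pvCpart ok start d done)
      = pvBfsB sd size steps (fuel - todo.length)
          (PySem.Dict.mk (pvItems ok start (d + 1))) (pvF ok start (d + 1)) := by
  intro todo
  induction todo with
  | nil =>
    intro done fuel hsplit _
    rw [List.append_nil] at hsplit
    subst hsplit
    rw [pvCpart_full, ← pvItems_succ, List.nil_append]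
    simp
  | cons p todo ih =>
    intro done fuel hsplit hfuel
    have hp : p ∈ pvF ok start d := by rw [hsplit]; simp
    cases fuel with
    | zero => simp at hfuel
    | succ fuel =>
      rw [List.cons_append]
      show pvBfsB sd size steps (fuel + 1) _ (p :: (todo ++ pvCpart ok start d done)) = _
      rw [pvBfsB]
      have hget : (PySem.Dict.mk (pvItems ok start d
          ++ (pvCpart ok start d done).map (fun q => (q, (d : Int) + 1)))).getD p 0 = (d : Int) := by
        rw [PySem.Dict.getD_eq_get?_getD, pvGet?_mk_append_left, pvGet?_items ok start d d le_rfl p hp]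
        · rfl
        · rw [pvKeys_items]
          exact pvF_sub_seen ok start d hp
      rw [hget, if_neg (by omega)]
      rw [pvAdd_fold ok size sd hok ((d : Int) + 1)]
      have hfil : (pvNbrsB p).filter (fun q =>
            !((PySem.Dict.mk (pvItems ok start d
              ++ (pvCpart ok start d done).map (fun q => (q, (d : Int) + 1)))).contains q) && ok q)
          = (pvNbrsB p).filter (fun q =>
            !((pvSeen ok start d).contains q || (pvCpart ok start d done).contains q) && ok q) := by
        apply List.filter_congr
        intro q _
        rw [pvContains_ext]
      rw [hfil]
      have hsnoc := pvCpart_snoc ok start d done p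
      have hitems : (pvItems ok start d
            ++ (pvCpart ok start d done).map (fun q => (q, (d : Int) + 1)))
            ++ (PySem.List.dedup ((pvNbrsB p).filter
              (fun q => !((pvSeen ok start d).contains q || (pvCpart ok start d done).contains q) && ok q))).map
                (fun q => (q, (d : Int) + 1))
          = pvItems ok start d
            ++ (pvCpart ok start d (done ++ [p])).map (fun q => (q, (d : Int) + 1)) := by
        rw [hsnoc, List.map_append, List.append_assoc]
      have hpend : (todo ++ pvCpart ok start d done)
            ++ PySem.List.dedup ((pvNbrsB p).filter
              (fun q => !((pvSeen ok start d).contains q || (pvCpart ok start d done).contains q) && ok q))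
          = todo ++ pvCpart ok start d (done ++ [p]) := by
        rw [hsnoc, List.append_assoc]
      show pvBfsB sd size steps fuel (PySem.Dict.mk _) _ = _
      rw [hitems, hpend, ih (done ++ [p]) fuel (by rw [hsplit, List.append_assoc]; rfl) (by simpa using Nat.le_of_succ_le_succ hfuel)]
      congr 1
      simp only [List.length_cons]
      omega

-- draining the last level (no expansion once the distance reaches steps)
theorem pvDrain (ok : Int × Int → Bool) (size steps : Int) (sd : PySem.Dict (Int × Int) String)
    (start : Int × Int) (M : Nat) (hM : steps ≤ (M : Int)) :
    ∀ (todo : List (Int × Int)) (fuel : Nat),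
      (∀ p ∈ todo, p ∈ pvF ok start M) → todo.length ≤ fuel →
      pvBfsB sd size steps fuel (PySem.Dict.mk (pvItems ok start M)) todo
        = PySem.Dict.mk (pvItems ok start M) := by
  intro todo
  induction todo with
  | nil => intro fuel _ _; cases fuel <;> rfl
  | cons p todo ih =>
    intro fuel hmem hfuel
    cases fuel with
    | zero => simp at hfuel
    | succ fuel =>
      rw [pvBfsB]
      have hget : (PySem.Dict.mk (pvItems ok start M)).getD p 0 = (M : Int) := by
        rw [PySem.Dict.getD_eq_get?_getD, pvGet?_items ok start M M le_rfl p (hmem p (by simp))]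
        rfl
      rw [hget, if_pos hM]
      exact ih fuel (fun q hq => hmem q (by simp [hq])) (by simpa using Nat.le_of_succ_le_succ hfuel)

-- fuel accounting: the number of cells in levels d .. d+k
def pvSum (ok : Int × Int → Bool) (start : Int × Int) (d : Nat) : Nat → Nat
  | 0 => (pvF ok start d).length
  | k + 1 => pvSum ok start d k + (pvF ok start (d + k + 1)).length

theorem pvSum_head (ok : Int × Int → Bool) (start : Int × Int) :
    ∀ (k d : Nat), pvSum ok start d (k + 1) = (pvF ok start d).length + pvSum ok start (d + 1) k := by
  intro k
  induction k with
  | zero => intro d; simp [pvSum]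
  | succ k ih =>
    intro d
    show pvSum ok start d (k + 1) + (pvF ok start (d + (k + 1) + 1)).length = _
    rw [ih d]
    show _ = (pvF ok start d).length + (pvSum ok start (d + 1) k + (pvF ok start (d + 1 + k + 1)).length)
    have : d + (k + 1) + 1 = d + 1 + k + 1 := by omega
    rw [this]
    omega

theorem pvFlat_len : ∀ (l : List (Int × Int)), (l.flatMap pvNbrsB).length = 4 * l.length := by
  intro l
  induction l with
  | nil => rfl
  | cons x l ih => simp [List.flatMap_cons, ih, pvNbrsB]; omega

theorem pvF_len_le (ok : Int × Int → Bool) (start : Int × Int) :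
    ∀ (j : Nat), (pvF ok start j).length ≤ 4 ^ j := by
  intro j
  induction j with
  | zero => simp [pvF_zero]
  | succ j ih =>
    rw [pvF_succ, pvLevel, PySem.List.dedup_eq_ofList]
    calc (PySem.Set.ofList (((pvF ok start j).flatMap pvNbrsB).filter _)).length
        ≤ (((pvF ok start j).flatMap pvNbrsB).filter _).length := PySem.Set.length_ofList_le _
      _ ≤ ((pvF ok start j).flatMap pvNbrsB).length := List.length_filter_le _ _
      _ = 4 * (pvF ok start j).length := pvFlat_len _
      _ ≤ 4 * 4 ^ j := by omega
      _ = 4 ^ (j + 1) := by rw [pow_succ]; ring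

theorem pvSum_le (ok : Int × Int → Bool) (start : Int × Int) :
    ∀ (k d : Nat), pvSum ok start d k ≤ 4 ^ (d + k + 1) := by
  intro k
  induction k with
  | zero =>
    intro d
    calc pvSum ok start d 0 = (pvF ok start d).length := rfl
      _ ≤ 4 ^ d := pvF_len_le ok start d
      _ ≤ 4 ^ (d + 0 + 1) := Nat.pow_le_pow_right (by omega) (by omega)
  | succ k ih =>
    intro d
    show pvSum ok start d k + (pvF ok start (d + k + 1)).length ≤ 4 ^ (d + (k + 1) + 1)
    have h1 := ih d
    have h2 := pvF_len_le ok start (d + k + 1)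
    have h3 : 4 ^ (d + (k + 1) + 1) = 4 * 4 ^ (d + k + 1) := by
      rw [pow_succ]
      ring
    omega

theorem pvOuter (ok : Int × Int → Bool) (size steps : Int) (sd : PySem.Dict (Int × Int) String)
    (hok : ∀ q, sd.contains (PySem.Int.mod q.1 size, PySem.Int.mod q.2 size) = ok q)
    (start : Int × Int) (M : Nat) (hM : (M : Int) = steps) :
    ∀ (k d : Nat) (fuel : Nat), d + k = M → pvSum ok start d k ≤ fuel →
      pvBfsB sd size steps fuel (PySem.Dict.mk (pvItems ok start d)) (pvF ok start d)
        = PySem.Dict.mk (pvItems ok start M) := by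
  intro k
  induction k with
  | zero =>
    intro d fuel hdk hfuel
    have hd : d = M := by omega
    subst hd
    exact pvDrain ok size steps sd start d (by omega) (pvF ok start d) fuel (fun _ h => h) hfuel
  | succ k ih =>
    intro d fuel hdk hfuel
    have hdlt : (d : Int) < steps := by rw [← hM]; exact_mod_cast (by omega : d < M)
    have hinner := pvInner ok size steps sd hok start d hdlt (pvF ok start d) [] fuel
      (by simp) (by rw [pvSum_head] at hfuel; omega)
    have hC0 : pvCpart ok start d [] = [] := rfl
    rw [hC0, List.map_nil, List.append_nil, List.append_nil] at hinner
    rw [hinner]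
    apply ih (d + 1) (fuel - (pvF ok start d).length) (by omega)
    rw [pvSum_head] at hfuel
    omega

-- ---------- counting ----------

theorem pvCount_vals (ok : Int × Int → Bool) (start : Int × Int) (M : Nat) (i : Nat) :
    ((pvItems ok start M).map (fun x => x.2)).count (i : Int)
      = if i ≤ M then (pvF ok start i).length else 0 := by
  induction M with
  | zero =>
    have h0 : pvItems ok start 0 = [(start, (0 : Int))] := rfl
    rw [h0]
    by_cases hi : i = 0
    · subst hi; simp [pvF_zero]
    · have hne : ((i : Int)) ≠ (0 : Int) := by exact_mod_cast hi
      simp [hi, hne.symm]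
  | succ M ih =>
    rw [pvItems_succ, List.map_append, List.count_append, ih, List.map_map]
    have hconst : ((pvF ok start (M + 1)).map ((fun x => x.2) ∘ (fun p => (p, (M : Int) + 1))))
        = List.replicate (pvF ok start (M + 1)).length ((M : Int) + 1) := by
      show (pvF ok start (M + 1)).map (fun _ => ((M : Int) + 1)) = _
      exact List.map_const' ..
    rw [hconst, List.count_replicate]
    by_cases hi : i ≤ M
    · have hne : (((M : Int) + 1) == ((i : Int))) = false := by
        simp only [beq_eq_false_iff_ne, ne_eq]
        intro h
        have : (M : Int) + 1 = (i : Nat) := h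
        omega
      simp [hne, hi, Nat.le_succ_of_le hi]
    · by_cases hi1 : i = M + 1
      · subst hi1
        have heq : (((M : Int) + 1) == ((M + 1 : Nat) : Int)) = true := by
          simp only [beq_iff_eq]
          push_cast
          ring
        simp [heq, hi]
      · have hne : (((M : Int) + 1) == ((i : Int))) = false := by
          simp only [beq_eq_false_iff_ne, ne_eq]
          intro h
          have : (M : Int) + 1 = (i : Nat) := h
          omega
        have h2 : ¬ i ≤ M + 1 := by omega
        simp [hne, hi, h2]

-- ---------- totals / cache models ----------

def pvTot (ok : Int × Int → Bool) (start : Int × Int) : Nat → Int × Int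
  | 0 => (1, 0)
  | i + 1 =>
    let t := pvTot ok start i
    if (i + 1) % 2 = 0 then (t.1 + ((pvF ok start (i + 1)).length : Int), t.2)
    else (t.1, t.2 + ((pvF ok start (i + 1)).length : Int))

def pvV (ok : Int × Int → Bool) (start : Int × Int) (i : Nat) : Int :=
  if i % 2 = 0 then (pvTot ok start i).1 else (pvTot ok start i).2

theorem pvTot_succ (ok : Int × Int → Bool) (start : Int × Int) (k : Nat) :
    pvTot ok start (k + 1)
      = if (k + 1) % 2 = 0
        then ((pvTot ok start k).1 + ((pvF ok start (k + 1)).length : Int), (pvTot ok start k).2)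
        else ((pvTot ok start k).1, (pvTot ok start k).2 + ((pvF ok start (k + 1)).length : Int)) := rfl

theorem pvV_step (ok : Int × Int → Bool) (start : Int × Int) (k : Nat) :
    pvV ok start (k + 1)
      = (if (k + 1) % 2 = 0 then (pvTot ok start k).1 else (pvTot ok start k).2)
        + ((pvF ok start (k + 1)).length : Int) := by
  by_cases h : (k + 1) % 2 = 0 <;> simp [pvV, pvTot_succ, h]

theorem pvTot_prev (ok : Int × Int → Bool) (start : Int × Int) (m : Nat) :
    (if (m + 2) % 2 = 0 then (pvTot ok start (m + 1)).1 else (pvTot ok start (m + 1)).2)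
      = pvV ok start m := by
  by_cases h : m % 2 = 0
  · have h2 : (m + 2) % 2 = 0 := by omega
    have h1 : ¬ ((m + 1) % 2 = 0) := by omega
    simp [pvV, pvTot_succ, h, h1, h2]
  · have h2 : ¬ ((m + 2) % 2 = 0) := by omega
    have h1 : (m + 1) % 2 = 0 := by omega
    simp [pvV, pvTot_succ, h, h1, h2]

theorem pvCache_succ (ok : Int × Int → Bool) (start : Int × Int) (k : Nat) :
    pvCache ok start ((k + 1 : Nat) : Int)
      = (pvCache ok start (k : Int)).insert (((k : Nat) : Int) + 1)
          (((pvF ok start (k + 1)).length : Int)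
            + (pvCache ok start (k : Int)).getD ((((k : Nat) : Int) + 1) - 2) 0) := by
  have hcast : (((k + 1 : Nat) : Int) + 1) = (((k : Nat) : Int) + 1) + 1 := by push_cast; ring
  have htoNat : (((k : Nat) : Int) + 1).toNat = k + 1 := by omega
  rw [pvCache, hcast, PySem.List.pyRange_one_succ_right (by omega), List.foldl_append,
    List.foldl_cons, List.foldl_nil, htoNat]
  rfl

theorem pvCacheD (ok : Int × Int → Bool) (start : Int × Int) :
    ∀ (k : Nat) (j : Int), (pvCache ok start (k : Int)).getD j 0
      = if 0 ≤ j ∧ j ≤ (k : Int) then pvV ok start j.toNat else 0 := by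
  intro k
  induction k with
  | zero =>
    intro j
    have h0 : pvCache ok start ((0 : Nat) : Int) = pvCache0 := by
      rw [pvCache]
      rw [PySem.List.pyRange_one_eq_nil (by norm_num)]
      rfl
    rw [h0, pvCache0, PySem.Dict.getD_insert]
    by_cases hj : j = 0
    · subst hj
      simp [pvV, pvTot]
    · rw [if_neg hj, PySem.Dict.getD_insert]
      by_cases hj1 : j = -1
      · subst hj1
        norm_num
      · rw [if_neg hj1, PySem.Dict.getD_empty]
        rw [if_neg (by omega)]
  | succ k ih =>
    intro j
    rw [pvCache_succ, PySem.Dict.getD_insert]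
    by_cases hj : j = (k : Int) + 1
    · subst hj
      rw [if_pos (by push_cast; omega)]
      have htn : ((k : Int) + 1).toNat = k + 1 := by omega
      rw [htn, ih]
      cases k with
      | zero =>
        rw [if_neg (by omega)]
        have h1 : ¬ ((0 + 1) % 2 = 0) := by omega
        rw [pvV_step]
        simp [h1, pvTot]
      | succ m =>
        rw [if_pos (by push_cast; omega)]
        have htn2 : ((((m + 1) : Nat) : Int) + 1 - 2).toNat = m := by omega
        rw [htn2, pvV_step]
        have : (m + 1 + 1) % 2 = (m + 2) % 2 := rfl
        rw [this, pvTot_prev]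
        rw [if_pos (by push_cast; omega)]
        ring
    · rw [if_neg hj, ih]
      by_cases hin : 0 ≤ j ∧ j ≤ (k : Int)
      · rw [if_pos hin, if_pos ⟨hin.1, by push_cast; omega⟩]
      · rw [if_neg hin, if_neg (by push_cast at hj ⊢; omega)]

theorem pvCache_value (ok : Int × Int → Bool) (start : Int × Int) (k : Nat) :
    ((pvF ok start (k + 1)).length : Int)
      + (pvCache ok start (k : Int)).getD ((((k : Nat) : Int) + 1) - 2) 0
      = pvV ok start (k + 1) := by
  rw [pvCacheD]
  cases k with
  | zero =>
    rw [if_neg (by norm_num)]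
    have h1 : ¬ ((0 + 1) % 2 = 0) := by omega
    rw [pvV_step]
    simp [h1, pvTot]
  | succ m =>
    rw [if_pos (by push_cast; omega)]
    have htn2 : ((((m + 1) : Nat) : Int) + 1 - 2).toNat = m := by omega
    rw [htn2, pvV_step]
    have : (m + 1 + 1) % 2 = (m + 2) % 2 := rfl
    rw [this, pvTot_prev]
    ring

-- ---------- port A loop invariant ----------

theorem pvFilterMap_eq (visited : List (Int × Int)) (c : Int × Int → Bool) (pos : Int × Int) :
    (pvDirsA.filterMap (fun dir =>
      let np : Int × Int := (pos.1 + dir.1, pos.2 + dir.2)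
      if ¬ np ∈ visited ∧ c np = true then some np else none))
    = (pvNbrsB pos).filter (fun q => !(visited.contains q) && c q) := by
  have hcond : ∀ q : Int × Int, ((!(visited.contains q) && c q) = true) ↔ (¬ q ∈ visited ∧ c q = true) := by
    intro q
    simp [List.contains_eq_mem]
  have h1 : ((pos.1 + 1, pos.2 + 0) : Int × Int) = (pos.1 + 1, pos.2) := by simp
  have h2 : ((pos.1 + -1, pos.2 + 0) : Int × Int) = (pos.1 - 1, pos.2) := by
    simp [sub_eq_add_neg]
  have h3 : ((pos.1 + 0, pos.2 + 1) : Int × Int) = (pos.1, pos.2 + 1) := by simp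
  have h4 : ((pos.1 + 0, pos.2 + -1) : Int × Int) = (pos.1, pos.2 - 1) := by
    simp [sub_eq_add_neg]
  simp only [pvDirsA, pvNbrsB, List.filterMap_cons, List.filterMap_nil, List.filter_cons,
    List.filter_nil, h1, h2, h3, h4]
  by_cases c1 : (¬ (pos.1 + 1, pos.2) ∈ visited ∧ c (pos.1 + 1, pos.2) = true) <;>
    by_cases c2 : (¬ (pos.1 - 1, pos.2) ∈ visited ∧ c (pos.1 - 1, pos.2) = true) <;>
      by_cases c3 : (¬ (pos.1, pos.2 + 1) ∈ visited ∧ c (pos.1, pos.2 + 1) = true) <;>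
        by_cases c4 : (¬ (pos.1, pos.2 - 1) ∈ visited ∧ c (pos.1, pos.2 - 1) = true) <;>
          simp [c1, c2, c3, c4]

theorem pvA_loop (ok : Int × Int → Bool) (size : Int) (sd : PySem.Dict (Int × Int) String)
    (hok : ∀ q, sd.contains (PySem.Int.mod q.1 size, PySem.Int.mod q.2 size) = ok q)
    (start : Int × Int) (k : Nat) :
    ((PySem.List.pyRange 1 ((k : Int) + 1) 1).foldl (fun st i =>
      let visited := st.1
      let new := st.2.1
      let cache := st.2.2
      let new' : PySem.Set (Int × Int) := PySem.Set.ofList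
        (new.flatMap (fun pos =>
          pvDirsA.filterMap (fun dir =>
            let np : Int × Int := (pos.1 + dir.1, pos.2 + dir.2)
            if ¬ np ∈ visited ∧ sd.contains (PySem.Int.mod np.1 size, PySem.Int.mod np.2 size) = true
            then some np else none)))
      (new, new', cache.insert i (PySem.Set.len new' + cache.getD (i - 2) 0)))
      (PySem.Set.ofList [start], PySem.Set.ofList [start], pvCache0))
    = (pvPrev ok start k, pvF ok start k, pvCache ok start (k : Int)) := by
  induction k with
  | zero =>
    rw [PySem.List.pyRange_one_eq_nil (by norm_num)]
    rw [pvCache, PySem.List.pyRange_one_eq_nil (by norm_num)]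
    rfl
  | succ k ih =>
    have hcast : (((k + 1 : Nat) : Int) + 1) = (((k : Nat) : Int) + 1) + 1 := by push_cast; ring
    rw [hcast, PySem.List.pyRange_one_succ_right (by omega), List.foldl_append, ih]
    rw [List.foldl_cons, List.foldl_nil]
    have htoNat : (((k : Nat) : Int) + 1).toNat = k + 1 := by omega
    have hnew : PySem.Set.ofList
        ((pvF ok start k).flatMap (fun pos =>
          pvDirsA.filterMap (fun dir =>
            let np : Int × Int := (pos.1 + dir.1, pos.2 + dir.2)
            if ¬ np ∈ (pvPrev ok start k : PySem.Set (Int × Int)) ∧ sd.contains (PySem.Int.mod np.1 size, PySem.Int.mod np.2 size) = true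
            then some np else none)))
        = pvF ok start (k + 1) := by
      have h1 : ∀ pos : Int × Int, (pvDirsA.filterMap (fun dir =>
            let np : Int × Int := (pos.1 + dir.1, pos.2 + dir.2)
            if ¬ np ∈ (pvPrev ok start k : PySem.Set (Int × Int)) ∧ sd.contains (PySem.Int.mod np.1 size, PySem.Int.mod np.2 size) = true
            then some np else none))
          = (pvNbrsB pos).filter (fun q => !((pvPrev ok start k).contains q)
              && sd.contains (PySem.Int.mod q.1 size, PySem.Int.mod q.2 size)) := by
        intro pos
        exact pvFilterMap_eq (pvPrev ok start k)
          (fun q => sd.contains (PySem.Int.mod q.1 size, PySem.Int.mod q.2 size)) pos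
      simp only [h1]
      rw [← List.filter_flatMap]
      simp only [hok]
      rw [← PySem.List.dedup_eq_ofList]
      rw [← pvLevel]
      exact pvLevel_agree ok start k
    refine Prod.ext rfl (Prod.ext ?_ ?_)
    · show PySem.Set.ofList _ = pvF ok start (k + 1)
      exact hnew
    · show (pvCache ok start ((k : Nat) : Int)).insert (((k : Nat) : Int) + 1)
        (PySem.Set.len (PySem.Set.ofList _) + (pvCache ok start ((k : Nat) : Int)).getD ((((k : Nat) : Int) + 1) - 2) 0)
        = pvCache ok start ((k + 1 : Nat) : Int)
      rw [hnew, pvCache_succ]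
      rfl

-- ---------- port B counting fold ----------

theorem pvBfold (ok : Int × Int → Bool) (start : Int × Int) (M : Nat)
    (counts : PySem.Dict Int Int)
    (hcounts : ∀ i : Int, 1 ≤ i → i ≤ (M : Int) →
      counts.getD i 0 = ((pvF ok start i.toNat).length : Int)) :
    ∀ (k : Nat), k ≤ M →
      (PySem.List.pyRange 1 ((k : Int) + 1) 1).foldl (fun tc i =>
          let par := PySem.Int.mod i 2
          let t := tc.1.insert par (tc.1.getD par 0 + counts.getD i 0)
          (t, tc.2.insert i (t.getD par 0)))
        (((PySem.Dict.empty : PySem.Dict Int Int).insert 0 1).insert 1 0,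
         ((PySem.Dict.empty : PySem.Dict Int Int).insert (-1) 0).insert 0 1)
      = (PySem.Dict.mk [(0, (pvTot ok start k).1), (1, (pvTot ok start k).2)],
         pvCache ok start (k : Int)) := by
  intro k
  induction k with
  | zero =>
    intro _
    rw [PySem.List.pyRange_one_eq_nil (by norm_num)]
    rw [pvCache, PySem.List.pyRange_one_eq_nil (by norm_num)]
    rfl
  | succ k ih =>
    intro hkM
    have hcast : (((k + 1 : Nat) : Int) + 1) = (((k : Nat) : Int) + 1) + 1 := by push_cast; ring
    rw [hcast, PySem.List.pyRange_one_succ_right (by omega), List.foldl_append,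
      ih (by omega), List.foldl_cons, List.foldl_nil]
    have hcnt : counts.getD ((k : Int) + 1) 0 = ((pvF ok start (k + 1)).length : Int) := by
      have htn : ((k : Int) + 1).toNat = k + 1 := by omega
      have h := hcounts ((k : Int) + 1) (by omega) (by push_cast; omega)
      rw [h, htn]
    have hpar : PySem.Int.mod ((k : Int) + 1) 2 = (((k + 1) % 2 : Nat) : Int) := by
      rw [PySem.Int.mod_eq_emod_of_pos (by norm_num)]
      push_cast
      omega
    by_cases hpk : (k + 1) % 2 = 0
    · have hpar0 : PySem.Int.mod ((k : Int) + 1) 2 = 0 := by rw [hpar, hpk]; rfl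
      simp only [hpar0, hcnt]
      have hget : (PySem.Dict.mk [(0, (pvTot ok start k).1), (1, (pvTot ok start k).2)]).getD (0 : Int) 0
          = (pvTot ok start k).1 := by
        rw [PySem.Dict.getD_eq_get?_getD, PySem.Dict.get?_mk_cons]
        norm_num
      rw [hget]
      have hins : (PySem.Dict.mk [(0, (pvTot ok start k).1), (1, (pvTot ok start k).2)]).insert (0 : Int)
            ((pvTot ok start k).1 + ((pvF ok start (k + 1)).length : Int))
          = PySem.Dict.mk [(0, (pvTot ok start (k + 1)).1), (1, (pvTot ok start (k + 1)).2)] := by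
        apply PySem.Dict.ext
        rw [PySem.Dict.items_insert_of_contains]
        · simp [pvTot_succ, hpk]
        · rw [PySem.Dict.contains_iff_mem_keys]
          simp [PySem.Dict.keys]
      rw [hins]
      have hget2 : (PySem.Dict.mk [(0, (pvTot ok start (k + 1)).1), (1, (pvTot ok start (k + 1)).2)]).getD (0 : Int) 0
          = (pvTot ok start (k + 1)).1 := by
        rw [PySem.Dict.getD_eq_get?_getD, PySem.Dict.get?_mk_cons]
        norm_num
      rw [hget2]
      have hval : (pvTot ok start (k + 1)).1 = pvV ok start (k + 1) := by
        rw [pvV, if_pos hpk]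
      rw [hval, pvCache_succ, pvCache_value]
    · have hpk1 : (k + 1) % 2 = 1 := by omega
      have hpar1 : PySem.Int.mod ((k : Int) + 1) 2 = 1 := by rw [hpar, hpk1]; rfl
      simp only [hpar1, hcnt]
      have hget : (PySem.Dict.mk [(0, (pvTot ok start k).1), (1, (pvTot ok start k).2)]).getD (1 : Int) 0
          = (pvTot ok start k).2 := by
        rw [PySem.Dict.getD_eq_get?_getD, PySem.Dict.get?_mk_cons]
        norm_num
        rw [PySem.Dict.get?_mk_cons]
        norm_num
      rw [hget]
      have hins : (PySem.Dict.mk [(0, (pvTot ok start k).1), (1, (pvTot ok start k).2)]).insert (1 : Int)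
            ((pvTot ok start k).2 + ((pvF ok start (k + 1)).length : Int))
          = PySem.Dict.mk [(0, (pvTot ok start (k + 1)).1), (1, (pvTot ok start (k + 1)).2)] := by
        apply PySem.Dict.ext
        rw [PySem.Dict.items_insert_of_contains]
        · simp [pvTot_succ, hpk]
        · rw [PySem.Dict.contains_iff_mem_keys]
          simp [PySem.Dict.keys]
      rw [hins]
      have hget2 : (PySem.Dict.mk [(0, (pvTot ok start (k + 1)).1), (1, (pvTot ok start (k + 1)).2)]).getD (1 : Int) 0
          = (pvTot ok start (k + 1)).2 := by
        rw [PySem.Dict.getD_eq_get?_getD, PySem.Dict.get?_mk_cons]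
        norm_num
        rw [PySem.Dict.get?_mk_cons]
        norm_num
      rw [hget2]
      have hval : (pvTot ok start (k + 1)).2 = pvV ok start (k + 1) := by
        rw [pvV, if_neg (by omega)]
      rw [hval, pvCache_succ, pvCache_value]

-- ---------- final assembly ----------

theorem pvHead_eq (sd : PySem.Dict (Int × Int) String)
    (h : "S" ∈ sd.values) :
    ∃ kv, (sd.items.filter (fun kv => kv.2 == "S")).head? = some kv := by
  simp only [PySem.Dict.values, List.mem_map] at h
  obtain ⟨p, hp, hps⟩ := h
  have hmem : p ∈ sd.items.filter (fun kv => kv.2 == "S") :=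
    List.mem_filter.mpr ⟨hp, by simp [hps]⟩
  cases hh : (sd.items.filter (fun kv => kv.2 == "S")).head? with
  | none =>
    rw [List.head?_eq_none_iff] at hh
    rw [hh] at hmem
    cases hmem
  | some kv => exact ⟨kv, rfl⟩

theorem pvMain (sparse : List (Int × Int × String)) (size : Int) (remainder : Int)
    (hpre : Pre_walking sparse size remainder) :
    walking sparse size remainder = walking_alt sparse size remainder := by
  obtain ⟨hS, _⟩ := hpre
  obtain ⟨kv, hkv⟩ := pvHead_eq (PySem.Dict.ofList (sparse.map (fun t => ((t.1, t.2.1), t.2.2)))) hS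
  simp only [walking, walking_alt, hkv]
  set sd : PySem.Dict (Int × Int) String :=
    PySem.Dict.ofList (sparse.map (fun t => ((t.1, t.2.1), t.2.2))) with hsd
  set ok : Int × Int → Bool :=
    fun q => sd.contains (PySem.Int.mod q.1 size, PySem.Int.mod q.2 size) with hok_def
  have hok : ∀ q : Int × Int, sd.contains (PySem.Int.mod q.1 size, PySem.Int.mod q.2 size) = ok q :=
    fun q => rfl
  by_cases hst : (2 * size + remainder) ≤ 0
  · -- no iterations on either side
    have hr : PySem.List.pyRange 1 (2 * size + remainder + 1) = [] :=
      PySem.List.pyRange_one_eq_nil (by omega)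
    have ht : (2 * size + remainder).toNat = 0 := Int.toNat_of_nonpos hst
    simp only [hr, ht, List.foldl_nil]
  · have hk : (((2 * size + remainder).toNat : Nat) : Int) = 2 * size + remainder :=
      Int.toNat_of_nonneg (by omega)
    set M : Nat := (2 * size + remainder).toNat with hM
    -- port A equals the model cache
    have hA := pvA_loop ok size sd hok kv.1 M
    -- port B: the FIFO BFS computes the distance table
    have hd0 : (PySem.Dict.empty : PySem.Dict (Int × Int) Int).insert kv.1 0
        = PySem.Dict.mk (pvItems ok kv.1 0) := rfl
    have hstart0 : [kv.1] = pvF ok kv.1 0 := rfl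
    have hfuel : pvSum ok kv.1 0 M ≤ 4 ^ (M + 1) + 1 := by
      have h1 := pvSum_le ok kv.1 M 0
      have h2 : (0 : Nat) + M + 1 = M + 1 := by omega
      rw [h2] at h1
      omega
    have hB := pvOuter ok size (2 * size + remainder) sd hok kv.1 M hk M 0
      (4 ^ (M + 1) + 1) (by omega) hfuel
    rw [hd0, hstart0]
    rw [← hk]
    rw [← hk] at hB
    rw [hB]
    -- counts is the counter of the recorded distances
    have hvals : (PySem.Dict.mk (pvItems ok kv.1 M)).values
        = (pvItems ok kv.1 M).map (fun x => x.2) := rfl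
    have hcounts : ∀ i : Int, 1 ≤ i → i ≤ (M : Int) →
        ((PySem.Dict.mk (pvItems ok kv.1 M)).values.foldl
          (fun c v => c.insert v (c.getD v 0 + 1)) (PySem.Dict.empty : PySem.Dict Int Int)).getD i 0
        = ((pvF ok kv.1 i.toNat).length : Int) := by
      intro i hi1 hi2
      rw [PySem.Dict.foldl_insert_getD_add_one_eq_counter, PySem.Dict.getD_counter, hvals]
      have hcast : ((i.toNat : Nat) : Int) = i := by omega
      have hc2 := pvCount_vals ok kv.1 M i.toNat
      rw [hcast] at hc2
      rw [hc2, if_pos (by omega)]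
    have hfold := pvBfold ok kv.1 M _ hcounts M le_rfl
    rw [hfold]
    -- port A's result is the same cache
    refine (congrArg (fun t : PySem.Set (Int × Int) × PySem.Set (Int × Int) × PySem.Dict Int Int
      => t.2.2.items) hA).trans ?_
    rfl

-- ===== VERDICT (by name: the statement is the Claim_ definition above) =====
theorem walking_spec : Claim_equal_walking := by
  intro sparse size remainder _ hpre
  show walking sparse size remainder = walking_alt sparse size remainder
  exact pvMain sparse size remainder hpre
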